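-- pv_equiv track=rewrite | github.com/metraton/gaia-ops | tools/2-context/context_compressor.py | _summarize_services
-- ===== SOURCE A (Python) =====
-- from typing import Dict, Any, List, Optional, Tuple
--
-- def _summarize_services(services: List[Dict[str, Any]]) -> str:
--     """Create summary for services array."""
--     total = len(services)
--     running = sum(1 for s in services if s.get("status") == "running")
--     pending = sum(1 for s in services if s.get("status") == "pending")
--     failed = sum(1 for s in services if s.get("status") in ["failed", "error"])
--
--     return (
--         f"{total} services total: {running} running, "
--         f"{pending} pending, {failed} failed"
--     )
-- ===== SOURCE B (Python) =====
-- def _summarize_services(services):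
--     """Create summary for services array (single pass building a status frequency table)."""
--     counts = {}
--     for s in services:
--         st = s.get("status")
--         counts[st] = counts.get(st, 0) + 1
--     running = counts.get("running", 0)
--     pending = counts.get("pending", 0)
--     failed = counts.get("failed", 0) + counts.get("error", 0)
--     return (
--         f"{len(services)} services total: {running} running, "
--         f"{pending} pending, {failed} failed"
--     )
-- ===== Notes on version B (the rewrite author's own statement) =====
-- stated objective: simpler
-- what changed: Replaces A's four separate scans of the list (len plus three counting generator expressions) with one pass that builds a status->count frequency table, from which running/pending/failed are read off by lookups.
import Mathlib
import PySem

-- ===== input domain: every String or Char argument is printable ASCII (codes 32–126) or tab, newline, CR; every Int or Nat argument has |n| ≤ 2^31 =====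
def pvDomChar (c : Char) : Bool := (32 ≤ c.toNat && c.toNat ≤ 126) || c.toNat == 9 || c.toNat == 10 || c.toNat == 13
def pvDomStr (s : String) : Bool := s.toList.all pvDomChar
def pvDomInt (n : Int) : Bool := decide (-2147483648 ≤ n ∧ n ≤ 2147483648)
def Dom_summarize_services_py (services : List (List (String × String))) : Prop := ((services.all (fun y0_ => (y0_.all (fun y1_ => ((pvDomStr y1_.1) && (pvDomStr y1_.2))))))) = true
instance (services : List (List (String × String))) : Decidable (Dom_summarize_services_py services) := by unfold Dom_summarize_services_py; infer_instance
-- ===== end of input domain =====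

-- B makes one pass building a status→count table instead of A's four scans; objective: simpler decomposition.

-- ===== PORT A =====
-- four scans: len plus three counting generator expressions
def summarize_services_py (services : List (List (String × String))) : String :=
  let total : Int := services.length
  let running : Int := services.foldl
    (fun acc s => if (PySem.Dict.mk s).get? "status" == some "running" then acc + 1 else acc) 0
  let pending : Int := services.foldl
    (fun acc s => if (PySem.Dict.mk s).get? "status" == some "pending" then acc + 1 else acc) 0
  let failed : Int := services.foldl
    (fun acc s => if ((PySem.Dict.mk s).get? "status" == some "failed"
                      || (PySem.Dict.mk s).get? "status" == some "error") then acc + 1 else acc) 0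
  PySem.Int.toStr total ++ " services total: " ++ PySem.Int.toStr running ++ " running, "
    ++ PySem.Int.toStr pending ++ " pending, " ++ PySem.Int.toStr failed ++ " failed"

-- ===== PORT B =====
-- one pass building a frequency table of statuses, then four lookups
def summarize_services_py_alt (services : List (List (String × String))) : String :=
  let counts : PySem.Dict (Option String) Int :=
    services.foldl (fun d s => d.modify ((PySem.Dict.mk s).get? "status") 0 (· + 1)) PySem.Dict.empty
  let running : Int := counts.getD (some "running") 0
  let pending : Int := counts.getD (some "pending") 0
  let failed : Int := counts.getD (some "failed") 0 + counts.getD (some "error") 0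
  PySem.Int.toStr (services.length : Int) ++ " services total: " ++ PySem.Int.toStr running ++ " running, "
    ++ PySem.Int.toStr pending ++ " pending, " ++ PySem.Int.toStr failed ++ " failed"

-- ===== PRECONDITION & SPEC =====
def Spec_summarize_services_py (services : List (List (String × String))) (out : String) : Prop := out = summarize_services_py_alt services
instance (services : List (List (String × String))) (out : String) : Decidable (Spec_summarize_services_py services out) := by unfold Spec_summarize_services_py; infer_instance

-- ===== CLAIM (what is proved, stated in full; the proofs are below) =====
def Claim_equal_summarize_services_py : Prop := ∀ (services : List (List (String × String))), Dom_summarize_services_py services → Spec_summarize_services_py services (summarize_services_py services)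

-- ===== LEMMAS AND PROOFS =====

-- the status each service contributes to the table
def pvStatusOf (s : List (String × String)) : Option String := (PySem.Dict.mk s).get? "status"

-- A's single-status scan counts the same thing B's table stores
theorem pvScan_eq_count (services : List (List (String × String))) (v : String) :
    services.foldl (fun acc s => if (PySem.Dict.mk s).get? "status" == some v then acc + 1 else acc) 0
      = ((services.map pvStatusOf).count (some v) : Int) := by
  rw [PySem.List.foldl_if_add_one]
  simp [List.count, List.countP_map, pvStatusOf, Function.comp_def]

-- a countP of a disjunction of two distinct equalities is the sum of the two counts
theorem pvCountP_or_nat {α : Type} [BEq α] [LawfulBEq α] (l : List α) (a b : α) (h : a ≠ b) :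
    l.countP (fun x => x == a || x == b) = l.count a + l.count b := by
  induction l with
  | nil => rfl
  | cons x xs ih =>
    simp only [List.countP_cons, List.count_cons, ih]
    rcases eq_or_ne x a with rfl | hxa <;> rcases eq_or_ne x b with rfl | hxb <;>
      simp_all <;> omega

-- B's table lookup is the count of that status among the services
theorem pvTable_lookup (services : List (List (String × String))) (v : String) :
    (services.foldl (fun d s => d.modify ((PySem.Dict.mk s).get? "status") 0 (· + 1))
        (PySem.Dict.empty : PySem.Dict (Option String) Int)).getD (some v) 0
      = ((services.map pvStatusOf).count (some v) : Int) := by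
  have : services.foldl (fun d s => d.modify ((PySem.Dict.mk s).get? "status") 0 (· + 1))
        (PySem.Dict.empty : PySem.Dict (Option String) Int)
      = (services.map pvStatusOf).foldl (fun d x => d.modify x 0 (· + 1)) PySem.Dict.empty := by
    rw [List.foldl_map]; rfl
  rw [this, PySem.Dict.getD_foldl_modify_add_one, PySem.Dict.getD_empty]
  simp

-- ===== VERDICT (by name: the statement is the Claim_ definition above) =====
theorem summarize_services_py_spec : Claim_equal_summarize_services_py := by
  intro services _
  unfold Spec_summarize_services_py summarize_services_py summarize_services_py_alt
  simp only [pvScan_eq_count, pvTable_lookup]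
  have hfail : services.foldl
      (fun acc s => if ((PySem.Dict.mk s).get? "status" == some "failed"
                      || (PySem.Dict.mk s).get? "status" == some "error") then acc + 1 else acc) 0
      = ((services.map pvStatusOf).count (some "failed") : Int)
        + ((services.map pvStatusOf).count (some "error") : Int) := by
    rw [PySem.List.foldl_if_add_one]
    have hmap : (services.map pvStatusOf).countP
        (fun x => x == some "failed" || x == some "error")
        = services.countP (fun s => (PySem.Dict.mk s).get? "status" == some "failed"
                      || (PySem.Dict.mk s).get? "status" == some "error") := by
      simp [List.countP_map, pvStatusOf, Function.comp_def]
    rw [← hmap, pvCountP_or_nat _ _ _ (by simp)]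
    push_cast; ring
  rw [hfail]
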